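-- pv_equiv track=rewrite | github.com/matvi/CodeChallanges | first_coding/Flags.py | getMaxFlags
-- ===== SOURCE A (Python) =====
-- def getMaxFlags(B,k):
--     count = 0
--     flags = k
--
--     #for i in range(len(B)):
--     i = 0
--     while(k>0):
--         if i >= len(B):
--             return count
--         if B[i] == 1:
--             k -= 1
--             count +=1
--             i = i + flags
--         else:
--             i += 1
--     return count
-- ===== SOURCE B (Python) =====
-- def getMaxFlags(B, k):
--     # Successor-array approach: a backward pass precomputes nxt[i] = smallest
--     # j >= i with B[j] == 1 (n if none); the placement loop then follows these
--     # pointers, O(1) per flag, instead of scanning forward for the next 1.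
--     n = len(B)
--     nxt = [n] * (n + 1)
--     for i in range(n - 1, -1, -1):
--         nxt[i] = i if B[i] == 1 else nxt[i + 1]
--     count = 0
--     i = 0
--     while count < k and i < n:
--         j = nxt[i]
--         if j == n:
--             break
--         count += 1
--         i = j + k
--     return count
-- ===== Notes on version B (the rewrite author's own statement) =====
-- stated objective: alternative
-- what changed: Replaces A's forward scan that hunts for each next 1 by a two-stage approach: a backward pass builds a successor array nxt[i] = first one-index >= i, then the placement loop follows nxt pointers in O(1) per flag instead of scanning.
import Mathlib
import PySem

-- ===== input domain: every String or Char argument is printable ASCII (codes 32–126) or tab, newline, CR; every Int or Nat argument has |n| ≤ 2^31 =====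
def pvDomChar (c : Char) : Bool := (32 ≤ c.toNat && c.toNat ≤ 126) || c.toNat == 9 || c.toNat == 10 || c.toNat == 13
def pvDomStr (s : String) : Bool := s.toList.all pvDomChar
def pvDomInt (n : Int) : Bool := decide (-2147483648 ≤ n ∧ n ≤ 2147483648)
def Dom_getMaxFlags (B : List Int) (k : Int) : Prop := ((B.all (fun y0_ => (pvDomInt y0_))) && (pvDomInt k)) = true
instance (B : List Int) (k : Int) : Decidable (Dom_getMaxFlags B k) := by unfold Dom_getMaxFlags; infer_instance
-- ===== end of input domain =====

-- B replaces A's forward-scanning greedy by a backward-built successor array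
-- (nxt[i] = first one-index ≥ i) followed pointer-by-pointer (objective: alternative).

-- ===== PORT A =====
-- A's while-loop: state (k, count, i); `fl` is flags - 1 = k - 1 as a Nat
-- (flags = original k; the jump i + flags is only taken while k > 0, where
-- flags ≥ 1, so i + flags = i + 1 + fl exactly).
def getMaxFlagsLoopA (B : List Int) (fl : Nat) (k count : Int) (i : Nat) : Int :=
  if 0 < k then
    if B.length ≤ i then count
    else if B.getD i 0 = 1 then getMaxFlagsLoopA B fl (k - 1) (count + 1) (i + 1 + fl)
    else getMaxFlagsLoopA B fl k count (i + 1)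
  else count
termination_by B.length - i
decreasing_by all_goals omega

def getMaxFlags (B : List Int) (k : Int) : Int :=
  getMaxFlagsLoopA B (k - 1).toNat k 0 0

-- ===== PORT B =====
-- the backward pass of Source B: nxtOf l o builds the successor array of l with
-- positions offset by o (entry for position n is the sentinel n itself);
-- nxt[i] = i if B[i] == 1 else nxt[i+1] becomes a cons onto the tail's array.
def nxtOf : List Int → Nat → List Nat
  | [], o => [o]
  | x :: xs, o =>
    let rest := nxtOf xs (o + 1)
    (if x = 1 then o else rest.headD 0) :: rest

-- the while-loop of Source B: state (count, i), break when nxt[i] is the sentinel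
def getMaxFlagsLoopB (nxt : List Nat) (n : Nat) (k count i : Int) : Int :=
  if h : count < k ∧ i < (n : Int) then
    let j := nxt.getD i.toNat 0
    if j = n then count
    else getMaxFlagsLoopB nxt n k (count + 1) ((j : Int) + k)
  else count
termination_by (k - count).toNat
decreasing_by omega

def getMaxFlags_alt (B : List Int) (k : Int) : Int :=
  getMaxFlagsLoopB (nxtOf B 0) B.length k 0 0

-- ===== PRECONDITION & SPEC =====
def Spec_getMaxFlags (B : List Int) (k : Int) (out : Int) : Prop := out = getMaxFlags_alt B k
instance (B : List Int) (k : Int) (out : Int) : Decidable (Spec_getMaxFlags B k out) := by unfold Spec_getMaxFlags; infer_instance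

-- ===== CLAIM (what is proved, stated in full; the proofs are below) =====
def Claim_equal_getMaxFlags : Prop := ∀ (B : List Int) (k : Int), Dom_getMaxFlags B k → Spec_getMaxFlags B k (getMaxFlags B k)

-- ===== LEMMAS AND PROOFS =====

-- proof-side spec of the successor array: first 1-position of l, counting from j
def firstOne : List Int → Nat → Nat → Nat
  | [], _, bot => bot
  | x :: xs, j, bot => if x = 1 then j else firstOne xs (j + 1) bot

theorem nxtOf_ne_nil (l : List Int) (o : Nat) : nxtOf l o ≠ [] := by
  cases l <;> simp [nxtOf]

theorem nxtOf_getD (l : List Int) (o i : Nat) (h : i ≤ l.length) :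
    (nxtOf l o).getD i 0 = firstOne (l.drop i) (o + i) (o + l.length) := by
  induction l generalizing o i with
  | nil =>
    have : i = 0 := by simpa using h
    subst this; simp [nxtOf, firstOne]
  | cons x xs ih =>
    cases i with
    | zero =>
      simp only [nxtOf, List.drop_zero, firstOne, List.getD_cons_zero]
      by_cases hx : x = 1
      · simp [hx]
      · have hh : (nxtOf xs (o + 1)).headD 0 = (nxtOf xs (o + 1)).getD 0 0 := by
          cases hns : nxtOf xs (o + 1) with
          | nil => exact absurd hns (nxtOf_ne_nil xs (o + 1))
          | cons a as => simp
        have := ih (o + 1) 0 (by omega)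
        simp only [hx, if_false]
        rw [hh, this]
        simp only [List.drop_zero, Nat.add_zero, List.length_cons]
        congr 1 <;> omega
    | succ t =>
      simp only [nxtOf, List.getD_cons_succ, List.drop_succ_cons, List.length_cons]
      rw [ih (o + 1) t (by simpa using h)]
      congr 1 <;> omega

-- A's inner scanning unrolled: one greedy step is "find the first 1 at or after i"
theorem loopA_scan (B : List Int) (fl : Nat) (kk count : Int) (i : Nat) (hk : 0 < kk) :
    getMaxFlagsLoopA B fl kk count i =
      if firstOne (B.drop i) i B.length = B.length then count
      else getMaxFlagsLoopA B fl (kk - 1) (count + 1)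
            (firstOne (B.drop i) i B.length + 1 + fl) := by
  induction hd : B.length - i generalizing i with
  | zero =>
    have hlen : B.length ≤ i := by omega
    rw [List.drop_eq_nil_of_le hlen]
    rw [getMaxFlagsLoopA]
    simp only [hk, if_true, hlen, if_true, firstOne, if_pos rfl]
  | succ m ih =>
    have hlen : i < B.length := by omega
    rw [List.drop_eq_getElem_cons hlen]
    have hget : B.getD i 0 = B[i] := List.getD_eq_getElem B 0 hlen
    by_cases h1 : B[i] = 1
    · simp only [firstOne, h1, if_true]
      have hne : i ≠ B.length := by omega
      rw [getMaxFlagsLoopA]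
      simp only [hk, if_true, show ¬ B.length ≤ i by omega, if_false, hget, h1, if_true,
        hne, if_false]
    · simp only [firstOne, h1, if_false]
      conv_lhs => rw [getMaxFlagsLoopA]
      simp only [hk, if_true, show ¬ B.length ≤ i by omega, if_false, hget, h1, if_false]
      exact ih (i + 1) (by omega)

theorem loopA_eq_loopB (B : List Int) (K : Int) (hK : 1 ≤ K) :
    ∀ n count (i : Nat), n = (K - count).toNat →
      getMaxFlagsLoopA B (K - 1).toNat (K - count) count i
        = getMaxFlagsLoopB (nxtOf B 0) B.length K count (i : Int) := by
  intro n
  induction n with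
  | zero =>
    intro count i hn
    have hc : K ≤ count := by omega
    rw [getMaxFlagsLoopA, getMaxFlagsLoopB]
    simp [show ¬ (0 : Int) < K - count by omega, show ¬ count < K by omega]
  | succ n ih =>
    intro count i hn
    have hc : count < K := by omega
    rw [loopA_scan B (K - 1).toNat (K - count) count i (by omega)]
    rw [getMaxFlagsLoopB]
    by_cases hi : i < B.length
    · simp only [hc, true_and, show ((i : Int) < (B.length : Int)) from by exact_mod_cast hi,
        if_pos, dif_pos (⟨hc, by exact_mod_cast hi⟩ : count < K ∧ (i : Int) < (B.length : Int))]
      have hidx : ((i : Int)).toNat = i := Int.toNat_natCast i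
      rw [hidx, nxtOf_getD B 0 i (by omega)]
      simp only [Nat.zero_add]
      set j := firstOne (B.drop i) i B.length with hj
      by_cases hjl : j = B.length
      · simp [hjl]
      · simp only [hjl, if_false]
        have harg : K - count - 1 = K - (count + 1) := by omega
        rw [harg, ih (count + 1) (j + 1 + (K - 1).toNat) (by omega)]
        congr 1
        push_cast
        omega
    · have hlen : B.length ≤ i := by omega
      rw [List.drop_eq_nil_of_le hlen]
      simp only [firstOne, if_pos rfl]
      have hguard : ¬ (count < K ∧ (i : Int) < (B.length : Int)) := by
        rintro ⟨_, h2⟩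
        have : i < B.length := by exact_mod_cast h2
        omega
      rw [dif_neg hguard]
      simp

-- ===== VERDICT (by name: the statement is the Claim_ definition above) =====
theorem getMaxFlags_spec : Claim_equal_getMaxFlags := by
  intro B k _
  unfold Spec_getMaxFlags getMaxFlags getMaxFlags_alt
  by_cases hk : 1 ≤ k
  · have := loopA_eq_loopB B k hk ((k - 0).toNat) 0 0 (by omega)
    simpa using this
  · rw [getMaxFlagsLoopA, getMaxFlagsLoopB]
    simp [show ¬ (0 : Int) < k by omega, show ¬ (0 : Int) < k by omega]
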